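-- pv_equiv track=rewrite | github.com/c1ko/monodon | utils/squat_generator.py | generate_numbers
-- ===== SOURCE A (Python) =====
-- import string
--
-- def generate_numbers(scanword):
-- 	# Count numbers in the word
-- 	contained_numbers = 0
-- 	for char in scanword:
-- 		if char in string.digits:
-- 			contained_numbers += 1
--
-- 	if contained_numbers > 0:
-- 		for i in range(0, int("9"*contained_numbers)+1):
-- 			current_number = str(i).zfill(contained_numbers)
--
-- 			outword = ""
-- 			index = 0
-- 			for char in scanword:
-- 				if char in string.digits:
-- 					outword += current_number[index]
-- 					index += 1
-- 				else:
-- 					outword += char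
--
-- 			yield outword
-- ===== SOURCE B (Python) =====
-- def generate_numbers(scanword):
-- 	# Build the suffix-combination list by one right-to-left structural pass:
-- 	# each digit position branches into '0'..'9', every other char is kept.
-- 	combos = [""]
-- 	any_digit = False
-- 	for ch in reversed(scanword):
-- 		if ch in "0123456789":
-- 			any_digit = True
-- 			combos = [d + rest for d in "0123456789" for rest in combos]
-- 		else:
-- 			combos = [ch + rest for rest in combos]
-- 	if any_digit:
-- 		yield from combos
-- ===== Notes on version B (the rewrite author's own statement) =====
-- stated objective: alternative
-- what changed: A counts digits, then for each integer from zero to 10^d-1 builds a zero-filled decimal string and rescans the whole word to splice it in; B makes a single right-to-left structural pass over the word, branching each digit position into the ten digits to build all substitutions directly, with no integer counter, no zfill and no per-candidate rescan.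
import Mathlib
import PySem

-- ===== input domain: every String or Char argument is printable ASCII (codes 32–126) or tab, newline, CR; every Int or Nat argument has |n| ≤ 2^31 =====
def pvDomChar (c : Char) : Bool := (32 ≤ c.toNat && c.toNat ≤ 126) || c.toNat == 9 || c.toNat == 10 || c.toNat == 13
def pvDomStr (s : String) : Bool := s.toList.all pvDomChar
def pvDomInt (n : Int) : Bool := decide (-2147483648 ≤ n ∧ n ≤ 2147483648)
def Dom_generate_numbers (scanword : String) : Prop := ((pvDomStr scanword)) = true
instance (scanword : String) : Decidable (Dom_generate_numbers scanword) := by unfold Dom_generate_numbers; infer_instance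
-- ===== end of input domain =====

-- B replaces A's integer-counter + zfill + per-candidate rescan of the word with one
-- structural right-to-left pass that branches each digit position into the ten digits
-- (objective: alternative decomposition, same output order).

-- ===== PORT A =====
-- string.digits
def pyDigits : List Char := ['0','1','2','3','4','5','6','7','8','9']

-- hand port of int("9"*d): the argument is a nonempty all-digit string (no sign,
-- whitespace or underscore), on which Python's int() is exactly this positional fold
def intOfNines (d : Nat) : Int :=
  (List.replicate d '9').foldl (fun acc c => acc * 10 + ((c.toNat : Int) - 48)) 0

def generate_numbers (scanword : String) : List String :=
  let contained_numbers : Int :=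
    scanword.toList.foldl (fun n c => if pyDigits.contains c then n + 1 else n) 0
  if contained_numbers > 0 then
    (PySem.List.pyRange 0 (intOfNines contained_numbers.toNat + 1)).map (fun i =>
      let current_number := PySem.Chars.zfill (PySem.Int.toChars i) contained_numbers
      -- inner for-loop: state (outword, index); current_number[index] is always in
      -- range (index counts digits seen; current_number has one char per digit)
      let st := scanword.toList.foldl
        (fun (st : List Char × Int) c =>
          if pyDigits.contains c then
            (st.1 ++ [PySem.List.pyGetD current_number st.2 ' '], st.2 + 1)
          else (st.1 ++ [c], st.2))
        ([], 0)
      String.ofList st.1)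
  else []

-- ===== PORT B =====
def generate_numbers_alt (scanword : String) : List String :=
  let st := scanword.toList.reverse.foldl
    (fun (st : List (List Char) × Bool) ch =>
      if pyDigits.contains ch then
        (pyDigits.flatMap (fun d => st.1.map (fun rest => d :: rest)), true)
      else (st.1.map (fun rest => ch :: rest), st.2))
    ([[]], false)
  if st.2 then st.1.map String.ofList else []

-- ===== PRECONDITION & SPEC =====
def Spec_generate_numbers (scanword : String) (out : List String) : Prop := out = generate_numbers_alt scanword
instance (scanword : String) (out : List String) : Decidable (Spec_generate_numbers scanword out) := by unfold Spec_generate_numbers; infer_instance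

-- ===== CLAIM (what is proved, stated in full; the proofs are below) =====
def Claim_equal_generate_numbers : Prop := ∀ (scanword : String), Dom_generate_numbers scanword → Spec_generate_numbers scanword (generate_numbers scanword)

-- ===== LEMMAS AND PROOFS =====

-- value of the hand-ported int("9"*d)
theorem intOfNines_fold (d : Nat) : ∀ a : Int,
    (List.replicate d '9').foldl (fun acc c => acc * 10 + ((c.toNat : Int) - 48)) a
      = a * 10 ^ d + (10 ^ d - 1) := by
  induction d with
  | zero => intro a; simp
  | succ d ih =>
    intro a
    rw [List.replicate_succ, List.foldl_cons, ih]
    push_cast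
    ring

theorem intOfNines_eq (d : Nat) : intOfNines d = 10 ^ d - 1 := by
  unfold intOfNines; rw [intOfNines_fold]; ring

-- decimal digit list of n, low digit last (what str(n) produces, unpadded)
def myDigits (n : Nat) : List Char :=
  if _h : n < 10 then [Nat.digitChar n]
  else myDigits (n / 10) ++ [Nat.digitChar (n % 10)]
  decreasing_by exact Nat.div_lt_self (by omega) (by omega)

theorem toDigitsCore_shift : ∀ (f n : Nat) (acc : List Char), n < f →
    Nat.toDigitsCore 10 f n acc = Nat.toDigitsCore 10 f n [] ++ acc := by
  intro f
  induction f with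
  | zero => intro n acc h; omega
  | succ f ih =>
    intro n acc h
    simp only [Nat.toDigitsCore]
    by_cases h10 : n / 10 = 0
    · simp [h10]
    · simp only [h10, if_false]
      have hlt : n / 10 < f := by
        have := Nat.div_lt_self (by omega : 0 < n) (by omega : 1 < 10)
        omega
      rw [ih (n / 10) (Nat.digitChar (n % 10) :: acc) hlt,
          ih (n / 10) [Nat.digitChar (n % 10)] hlt]
      simp

theorem toDigitsCore_eq_myDigits : ∀ (f n : Nat), n < f →
    Nat.toDigitsCore 10 f n [] = myDigits n := by
  intro f
  induction f with
  | zero => intro n h; omega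
  | succ f ih =>
    intro n h
    simp only [Nat.toDigitsCore]
    by_cases h10 : n / 10 = 0
    · have : n < 10 := by omega
      rw [myDigits]
      simp [h10, this, Nat.mod_eq_of_lt this]
    · have hlt : n / 10 < f := by
        have := Nat.div_lt_self (by omega : 0 < n) (by omega : 1 < 10)
        omega
      rw [myDigits]
      simp only [h10, if_false]
      have : ¬ n < 10 := by
        intro hc; exact h10 (Nat.div_eq_of_lt hc)
      rw [toDigitsCore_shift f (n/10) _ hlt, ih (n/10) hlt]
      simp [this]

theorem toChars_natCast (n : Nat) : PySem.Int.toChars (n : Int) = myDigits n := by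
  simp only [PySem.Int.toChars]
  rw [if_neg (by omega)]
  simp only [Int.toNat_natCast, Nat.toDigits]
  exact toDigitsCore_eq_myDigits (n+1) n (by omega)

theorem digitChar_mem (k : Nat) (h : k < 10) : Nat.digitChar k ∈ pyDigits := by
  interval_cases k <;> decide

theorem myDigits_mem (n : Nat) : ∀ c ∈ myDigits n, c ∈ pyDigits := by
  induction n using Nat.strong_induction_on with
  | _ n ih =>
    rw [myDigits]
    by_cases h : n < 10
    · simp only [h, dite_true, List.mem_singleton]
      rintro c rfl; exact digitChar_mem n h
    · simp only [h, dite_false, List.mem_append, List.mem_singleton]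
      rintro c (hc | rfl)
      · exact ih (n/10) (Nat.div_lt_self (by omega) (by omega)) c hc
      · exact digitChar_mem _ (Nat.mod_lt _ (by omega))

theorem myDigits_ne_nil (n : Nat) : myDigits n ≠ [] := by
  rw [myDigits]
  by_cases h : n < 10 <;> simp [h]

theorem myDigits_length_le (d n : Nat) (hd : 1 ≤ d) (hn : n < 10 ^ d) :
    (myDigits n).length ≤ d := by
  induction d generalizing n with
  | zero => omega
  | succ d ih =>
    rw [myDigits]
    by_cases h : n < 10
    · simp [h]
    · have hd1 : 1 ≤ d := by
        by_contra hc
        have : d = 0 := by omega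
        subst this; simp at hn; omega
      have : n / 10 < 10 ^ d := by
        apply Nat.div_lt_of_lt_mul; rw [pow_succ] at hn; omega
      simp only [h, dite_false, List.length_append, List.length_singleton]
      have := ih (n/10) hd1 this
      omega

def pad : Nat → Nat → List Char
  | 0, _ => []
  | d + 1, n => pad d (n / 10) ++ [Nat.digitChar (n % 10)]

theorem pad_zero (d : Nat) : pad d 0 = List.replicate d '0' := by
  induction d with
  | zero => rfl
  | succ d ih => simp [pad, ih, List.replicate_succ' ]; rfl

theorem zfill_no_sign (cs : List Char) (w : Int) (hne : cs ≠ [])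
    (hc : ∀ c ∈ cs, c ∈ pyDigits) :
    PySem.Chars.zfill cs w = List.replicate (w.toNat - cs.length) '0' ++ cs := by
  simp only [PySem.Chars.zfill]
  by_cases hw : w ≤ (cs.length : Int)
  · rw [if_pos hw]
    have : w.toNat - cs.length = 0 := by omega
    simp [this]
  · rw [if_neg hw]
    match cs, hne with
    | c :: rest, _ =>
      have hmem := hc c (List.mem_cons_self)
      have : ¬ (c = '+' ∨ c = '-') := by
        rintro (rfl | rfl) <;> simp [pyDigits] at hmem
      simp [this]

theorem pad_eq_replicate (d n : Nat) (hd : 1 ≤ d) (hn : n < 10 ^ d) :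
    pad d n = List.replicate (d - (myDigits n).length) '0' ++ myDigits n := by
  induction d generalizing n with
  | zero => omega
  | succ d ih =>
    rw [pad]
    by_cases h : n < 10
    · rw [Nat.div_eq_of_lt h, pad_zero, Nat.mod_eq_of_lt h]
      rw [myDigits]
      simp [h]
    · have hd1 : 1 ≤ d := by
        by_contra hc
        have : d = 0 := by omega
        subst this; simp at hn; omega
      have hq : n / 10 < 10 ^ d := by
        apply Nat.div_lt_of_lt_mul; rw [pow_succ] at hn; omega
      rw [ih (n/10) hd1 hq]
      conv_rhs => rw [myDigits]
      simp only [h, dite_false]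
      have hlen := myDigits_length_le d (n/10) hd1 hq
      simp only [List.length_append, List.length_singleton]
      rw [List.append_assoc]
      have he : d - (myDigits (n/10)).length = d + 1 - ((myDigits (n/10)).length + 1) := by omega
      rw [he]

theorem zfill_toChars (d n : Nat) (hd : 1 ≤ d) (hn : n < 10 ^ d) :
    PySem.Chars.zfill (PySem.Int.toChars (n : Int)) (d : Int) = pad d n := by
  rw [toChars_natCast n, zfill_no_sign _ _ (myDigits_ne_nil n) (myDigits_mem n),
      pad_eq_replicate d n hd hn]
  simp

-- all length-d digit strings, in lexicographic (= counter) order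
def allS : Nat → List (List Char)
  | 0 => [[]]
  | d + 1 => pyDigits.flatMap (fun c => (allS d).map (fun s => c :: s))

-- head-consuming substitution of a digit string into the template
def subst : List Char → List Char → List Char
  | [], _ => []
  | c :: t, ds =>
    if pyDigits.contains c then ds.headD ' ' :: subst t ds.tail else c :: subst t ds

theorem allS_snoc (d : Nat) :
    allS (d + 1) = (allS d).flatMap (fun s => pyDigits.map (fun c => s ++ [c])) := by
  induction d with
  | zero => decide
  | succ d ih =>
    show pyDigits.flatMap (fun c => (allS (d+1)).map (fun s => c :: s)) = _
    conv_lhs => rw [ih]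
    rw [allS]
    simp [List.map_flatMap, List.flatMap_map, List.flatMap_assoc, List.map_map, Function.comp_def]

theorem range_mul_ten {α : Type} (m : Nat) (f : Nat → α) :
    (List.range (m * 10)).map f
      = (List.range m).flatMap (fun q => (List.range 10).map (fun r => f (q * 10 + r))) := by
  induction m with
  | zero => simp
  | succ m ih =>
    rw [show (m+1)*10 = m*10+10 from by ring, List.range_add, List.map_append, ih]
    rw [show List.range (m+1) = List.range m ++ [m] from List.range_succ, List.flatMap_append]
    simp [List.map_map, Function.comp_def]

theorem map_pad_range (d : Nat) : (List.range (10 ^ d)).map (pad d) = allS d := by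
  induction d with
  | zero => decide
  | succ d ih =>
    rw [pow_succ, range_mul_ten, allS_snoc d, ← ih]
    rw [List.flatMap_map]
    congr 1
    funext q
    have h1 : ∀ r, r < 10 → pad (d+1) (q*10+r) = pad d q ++ [Nat.digitChar r] := by
      intro r hr
      show pad d ((q*10+r)/10) ++ [Nat.digitChar ((q*10+r)%10)] = _
      have e1 : (q*10+r)/10 = q := by omega
      have e2 : (q*10+r)%10 = r := by omega
      rw [e1, e2]
    rw [show List.range 10 = [0,1,2,3,4,5,6,7,8,9] from by decide]
    simp only [List.map_cons, List.map_nil, pyDigits]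
    rw [h1 0 (by omega), h1 1 (by omega), h1 2 (by omega), h1 3 (by omega), h1 4 (by omega),
        h1 5 (by omega), h1 6 (by omega), h1 7 (by omega), h1 8 (by omega), h1 9 (by omega)]
    rfl

theorem innerA_eq_subst (ds : List Char) : ∀ (cs : List Char) (acc : List Char) (i : Nat),
    i + cs.countP pyDigits.contains ≤ ds.length →
    cs.foldl
      (fun (st : List Char × Int) c =>
        if pyDigits.contains c then
          (st.1 ++ [PySem.List.pyGetD ds st.2 ' '], st.2 + 1)
        else (st.1 ++ [c], st.2))
      (acc, (i : Int))
      = (acc ++ subst cs (ds.drop i), ((i + cs.countP pyDigits.contains : Nat) : Int)) := by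
  intro cs
  induction cs with
  | nil => intro acc i h; simp [subst]
  | cons c t ih =>
    intro acc i h
    rw [List.foldl_cons]
    by_cases hc : pyDigits.contains c
    · have hc' : c ∈ pyDigits := by simpa using hc
      have hcnt : (c :: t).countP pyDigits.contains = t.countP pyDigits.contains + 1 := by
        simp [hc']
      have hi : i < ds.length := by rw [hcnt] at h; omega
      have hget : PySem.List.pyGetD ds (i : Int) ' ' = (ds.drop i).headD ' ' := by
        rw [PySem.List.pyGetD_eq_getElem ds ' ' (by omega) (by exact_mod_cast hi)]
        rw [List.headD_eq_head?_getD, List.head?_drop]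
        simp [hi]
      simp only [hc, if_true]
      have hcast : ((i : Int) + 1) = ((i + 1 : Nat) : Int) := by push_cast; ring
      rw [hcast, ih (acc ++ [PySem.List.pyGetD ds (i : Int) ' ']) (i+1) (by omega)]
      rw [subst]
      simp only [hc, if_true, hget, hcnt, Prod.mk.injEq]
      refine ⟨?_, by push_cast; ring⟩
      rw [List.append_assoc, List.tail_drop]
      rfl
    · have hcnt : (c :: t).countP pyDigits.contains = t.countP pyDigits.contains := by
        simp only [List.countP_cons, hc]
        simp
      rw [if_neg hc]
      rw [ih (acc ++ [c]) i (by omega)]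
      rw [subst]
      rw [if_neg hc]
      rw [hcnt, List.append_assoc]
      rfl

theorem foldB_eq (cs : List Char) :
    cs.reverse.foldl
      (fun (st : List (List Char) × Bool) ch =>
        if pyDigits.contains ch then
          (pyDigits.flatMap (fun d => st.1.map (fun rest => d :: rest)), true)
        else (st.1.map (fun rest => ch :: rest), st.2))
      ([[]], false)
      = ((allS (cs.countP pyDigits.contains)).map (subst cs), cs.any pyDigits.contains) := by
  rw [List.foldl_reverse]
  induction cs with
  | nil => simp [allS, subst]
  | cons c t ih =>
    rw [List.foldr_cons, ih]
    by_cases hc : pyDigits.contains c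
    · simp only [hc, if_true, List.countP_cons, List.any_cons, Prod.mk.injEq]
      refine ⟨?_, by simp⟩
      rw [allS]
      simp only [List.map_flatMap, List.map_map]
      congr 1
      funext dch
      simp only [Function.comp_def]
      congr 1
      funext s
      rw [subst, if_pos hc]
      rfl
    · rw [if_neg hc]
      simp only [List.countP_cons, List.any_cons, Prod.mk.injEq]
      refine ⟨?_, by simp [show c ∉ pyDigits from fun h => hc (by simpa using h)]⟩
      rw [show (if pyDigits.contains c = true then 1 else 0) = 0 from if_neg hc]
      simp only [List.map_map, Nat.add_zero]
      congr 1
      funext s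
      rw [subst, if_neg hc]
      rfl

theorem pad_length (d n : Nat) : (pad d n).length = d := by
  induction d generalizing n with
  | zero => rfl
  | succ d ih => simp [pad, ih]

theorem generate_numbers_eq (scanword : String) :
    generate_numbers scanword = generate_numbers_alt scanword := by
  unfold generate_numbers generate_numbers_alt
  rw [PySem.List.foldl_count_if pyDigits.contains scanword.toList 0, foldB_eq scanword.toList]
  set cs := scanword.toList with hcs
  set k := cs.countP pyDigits.contains with hk
  simp only [zero_add]
  by_cases hk0 : k = 0
  · have hany : cs.any pyDigits.contains = false := by
      rw [← Bool.not_eq_true, List.any_eq_true]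
      rintro ⟨x, hx, hpx⟩
      have : 0 < List.countP pyDigits.contains cs := List.countP_pos_iff.mpr ⟨x, hx, hpx⟩
      omega
    rw [if_neg (by exact_mod_cast by omega : ¬ ((k:Int) > 0))]
    simp [hany]
  · have hkpos : (0:Int) < (k:Int) := by exact_mod_cast Nat.pos_of_ne_zero hk0
    rw [if_pos (by exact hkpos)]
    have hany : cs.any pyDigits.contains = true := by
      rw [List.any_eq_true]
      have : 0 < List.countP pyDigits.contains cs := Nat.pos_of_ne_zero hk0
      exact List.countP_pos_iff.mp this
    simp only [hany, if_true]
    have htn : ((k:Int)).toNat = k := by omega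
    rw [htn, intOfNines_eq k,
        show (10:Int)^k - 1 + 1 = ((10^k : Nat) : Int) from by push_cast; ring,
        PySem.List.pyRange_zero_natCast (10^k), List.map_map]
    have hstep : ∀ i ∈ List.range (10^k),
        ((fun i : Int =>
          String.ofList
            (cs.foldl
              (fun (st : List Char × Int) c =>
                if pyDigits.contains c then
                  (st.1 ++ [PySem.List.pyGetD (PySem.Chars.zfill (PySem.Int.toChars i) (k:Int)) st.2 ' '], st.2 + 1)
                else (st.1 ++ [c], st.2))
              ([], 0)).1) ∘ (fun n : Nat => (n : Int))) i
          = String.ofList (subst cs (pad k i)) := by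
      intro i hi
      have hik : i < 10 ^ k := List.mem_range.mp hi
      simp only [Function.comp_apply]
      rw [zfill_toChars k i (Nat.pos_of_ne_zero hk0) hik]
      rw [show ((0:Int)) = ((0:Nat):Int) from rfl]
      rw [innerA_eq_subst (pad k i) cs [] 0 (by rw [pad_length]; omega)]
      simp
    rw [List.map_congr_left hstep]
    rw [show (fun i => String.ofList (subst cs (pad k i)))
          = (fun s => String.ofList (subst cs s)) ∘ pad k from rfl,
        ← List.map_map, map_pad_range k]
    simp [List.map_map, Function.comp_def]

-- ===== VERDICT (by name: the statement is the Claim_ definition above) =====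
theorem generate_numbers_spec : Claim_equal_generate_numbers := by
  intro scanword _
  exact generate_numbers_eq scanword
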